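-- pv_equiv track=rewrite | github.com/sinoyuco/leetcode_solutions | array/play_segments.py | playSegments
-- ===== SOURCE A (Python) =====
-- def playSegments(coins):
--     # Write your code here
--     for i in range(len(coins)):
--         p1 = p2 = 0
--         p1s, p2s = coins[:i], coins[i:]
--         for j in p1s:
--             if j != 0:
--                 p1 += j
--             else:
--                 p1 -= 1
--         if p1 > len(p2s):
--             return i
--         for k in p2s:
--             if k != 0:
--                 p2 += k
--             else:
--                 p2 -= 1
--         if p1 > p2:
--             return i
-- ===== SOURCE B (Python) =====
-- def playSegments(coins):
--     n = len(coins)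
--     total = sum(coins) - coins.count(0)   # transformed total: zeros count as -1
--     left = 0
--     for i, x in enumerate(coins):
--         if left > n - i or left > total - left:
--             return i
--         left += x if x != 0 else -1
--     return None
-- ===== Notes on version B (the rewrite author's own statement) =====
-- stated objective: alternative
-- what changed: Replaces A's per-split re-slicing and re-summing of both segments with one precomputed transformed total (sum(coins) - coins.count(0)) plus a running prefix sum, so each split is checked in O(1) in a single enumerate pass.
import Mathlib
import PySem

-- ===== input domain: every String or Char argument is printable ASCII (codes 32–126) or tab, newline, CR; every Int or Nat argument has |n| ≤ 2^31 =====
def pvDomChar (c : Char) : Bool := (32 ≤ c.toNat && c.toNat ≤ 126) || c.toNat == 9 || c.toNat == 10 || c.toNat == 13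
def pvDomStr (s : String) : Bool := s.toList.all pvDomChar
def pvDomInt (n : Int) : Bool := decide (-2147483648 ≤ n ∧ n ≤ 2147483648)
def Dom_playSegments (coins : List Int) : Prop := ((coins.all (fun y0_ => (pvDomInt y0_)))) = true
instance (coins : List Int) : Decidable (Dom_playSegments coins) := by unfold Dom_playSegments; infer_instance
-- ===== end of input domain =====

-- B replaces A's per-split re-summing of both segments by one precomputed total plus a
-- running prefix sum, checking each split in O(1) (objective: alternative single-pass algorithm).

-- ===== PORT A =====
-- A's outer 'for i in range(len(coins))' with early returns, transliterated as recursion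
-- over the range list; the two inner accumulation loops are the foldls over the slices.
def playSegmentsAux (coins : List Int) : List Int → Option Int
  | [] => none
  | i :: rest =>
    let p1s := PySem.List.slice coins none (some i)
    let p2s := PySem.List.slice coins (some i) none
    let p1 := p1s.foldl (fun a j => if j ≠ 0 then a + j else a - 1) 0
    if p1 > (p2s.length : Int) then some i
    else
      let p2 := p2s.foldl (fun a k => if k ≠ 0 then a + k else a - 1) 0
      if p1 > p2 then some i else playSegmentsAux coins rest

def playSegments (coins : List Int) : Option Int :=
  playSegmentsAux coins (PySem.List.pyRange 0 (coins.length : Int) 1)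

-- ===== PORT B =====
-- transformed value of one coin: x if x != 0 else -1
def pvTval (x : Int) : Int := if x ≠ 0 then x else -1

-- B's single 'for i, x in enumerate(coins)' loop with running prefix sum `left`
def playSegmentsAltAux (n total : Int) : List (Int × Int) → Int → Option Int
  | [], _ => none
  | (i, x) :: rest, left =>
    if left > n - i ∨ left > total - left then some i
    else playSegmentsAltAux n total rest (left + pvTval x)

def playSegments_alt (coins : List Int) : Option Int :=
  let n : Int := coins.length
  let total := coins.sum - PySem.List.count coins 0
  playSegmentsAltAux n total (PySem.List.enumerate coins 0) 0

-- ===== PRECONDITION & SPEC =====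
def Spec_playSegments (coins : List Int) (out : Option Int) : Prop := out = playSegments_alt coins
instance (coins : List Int) (out : Option Int) : Decidable (Spec_playSegments coins out) := by unfold Spec_playSegments; infer_instance

-- ===== CLAIM (what is proved, stated in full; the proofs are below) =====
def Claim_equal_playSegments : Prop := ∀ (coins : List Int), Dom_playSegments coins → Spec_playSegments coins (playSegments coins)

-- ===== LEMMAS AND PROOFS =====

-- A's accumulation loop body is addition of the transformed value
lemma foldl_body_eq (l : List Int) (s : Int) :
    l.foldl (fun a j => if j ≠ 0 then a + j else a - 1) s = s + (l.map pvTval).sum := by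
  have h : (fun a j : Int => if j ≠ 0 then a + j else a - 1)
      = (fun a j : Int => a + pvTval j) := by
    funext a j; by_cases hj : j = 0 <;> · simp [pvTval, hj]; try ring
  rw [h, PySem.List.foldl_add]

-- total splits as prefix + suffix
lemma total_split (coins : List Int) (k : Nat) :
    (coins.map pvTval).sum
      = ((coins.take k).map pvTval).sum + ((coins.drop k).map pvTval).sum := by
  conv_lhs => rw [← List.take_append_drop k coins]
  simp

lemma bridge (coins : List Int) : ∀ (m k : Nat), k ≤ coins.length → coins.length - k = m →
    playSegmentsAux coins (PySem.List.pyRange (k : Int) (coins.length : Int) 1)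
      = playSegmentsAltAux (coins.length : Int) ((coins.map pvTval).sum)
          (PySem.List.enumerate (coins.drop k) (k : Int)) (((coins.take k).map pvTval).sum) := by
  intro m
  induction m with
  | zero =>
    intro k hk hm
    have hkk : k = coins.length := by omega
    subst hkk
    rw [PySem.List.pyRange_one_eq_nil (by omega), List.drop_length]
    simp [playSegmentsAux, playSegmentsAltAux, PySem.List.enumerate]
  | succ m ih =>
    intro k hk hm
    have hlt : k < coins.length := by omega
    rw [PySem.List.pyRange_one_cons (by exact_mod_cast hlt),
        List.drop_eq_getElem_cons hlt, PySem.List.enumerate_cons]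
    show playSegmentsAux coins ((k : Int) :: _) = playSegmentsAltAux _ _ (((k : Int), coins[k]) :: _) _
    rw [playSegmentsAux, playSegmentsAltAux]
    rw [PySem.List.slice_to_natCast, PySem.List.slice_from_natCast, foldl_body_eq, foldl_body_eq]
    have hlen : (((coins.drop k).length : Nat) : Int) = (coins.length : Int) - (k : Int) := by
      rw [List.length_drop]; omega
    have hsuf : (0 : Int) + ((coins.drop k).map pvTval).sum
        = (coins.map pvTval).sum - ((coins.take k).map pvTval).sum := by
      rw [total_split coins k]; ring
    set p1 := ((coins.take k).map pvTval).sum with hp1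
    by_cases h1 : p1 > (coins.length : Int) - (k : Int)
    · rw [if_pos (by rw [zero_add]; omega), if_pos (Or.inl h1)]
    · rw [if_neg (by rw [zero_add]; omega)]
      by_cases h2 : p1 > (coins.map pvTval).sum - p1
      · rw [if_pos (by omega), if_pos (Or.inr h2)]
      · rw [if_neg (by omega), if_neg (by tauto)]
        have hrec := ih (k + 1) (by omega) (by omega)
        rw [show ((k : Int) + 1) = ((k + 1 : Nat) : Int) by push_cast; ring, hrec]
        congr 1
        rw [hp1, List.take_add_one, List.getElem?_eq_getElem hlt]
        simp only [Option.toList_some, List.map_append, List.map_cons, List.map_nil,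
          List.sum_append, List.sum_cons, List.sum_nil, add_zero]

-- sum(coins) - coins.count(0) is the transformed total
lemma total_eq (coins : List Int) :
    coins.sum - PySem.List.count coins 0 = (coins.map pvTval).sum := by
  rw [PySem.List.count_eq]
  induction coins with
  | nil => simp
  | cons x xs ih =>
    by_cases hx : x = 0 <;> · simp [pvTval, hx, ← ih]; try ring

-- ===== VERDICT (by name: the statement is the Claim_ definition above) =====
theorem playSegments_spec : Claim_equal_playSegments := by
  intro coins _
  show playSegments coins = playSegments_alt coins
  have h := bridge coins coins.length 0 (by omega) (by omega)
  simp only [List.drop_zero, List.take_zero, List.map_nil, List.sum_nil, Nat.cast_zero] at h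
  unfold playSegments playSegments_alt
  rw [total_eq, h]
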